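-- pv_equiv track=rewrite | github.com/alexdrymonitis/ThePythonAudioCookbook | Chapter9/Script9.13.py | add_stop_vals
-- ===== SOURCE A (Python) =====
-- def add_stop_vals(l):
-- 	# store the indexes with a 1
-- 	ones_ndx = []
-- 	if l[0] == 1:
-- 		ones_ndx.append(0)
-- 	for i in range(len(l)):
-- 		for j in range(i, len(l)):
-- 			if l[i] == 1 and j > i and l[j] == 1:
-- 				ones_ndx.append(j)
-- 				break
-- 	# then double the size of the list
-- 	for i in range(len(l)):
-- 		l.append(0)
-- 	# and double the values of the stored indexes
-- 	for i in range(len(ones_ndx)):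
-- 		ones_ndx[i] *= 2
-- 	# place the ones in the new indexes
-- 	for i in range(len(l)):
-- 		l[i] = 0
-- 		if i in ones_ndx:
-- 			l[i] = 1
-- 	# and a 2 (the stop value) before each 1
-- 	for i in ones_ndx:
-- 		if i > 0:
-- 			l[i-1] = 2
-- 	return l
-- ===== SOURCE B (Python) =====
-- # B: one-pass selection flag + single forward pass building interleaved (value, stop) slots;
-- # mutates l in place via l[:] = result, like A. Returns [] on empty input (A raises IndexError).
-- def add_stop_vals(l):
--     sel = []
--     seen = False
--     for i, v in enumerate(l):
--         sel.append(v == 1 and (i == 0 or seen))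
--         if v == 1:
--             seen = True
--     n = len(l)
--     result = []
--     for i in range(n):
--         result.append(1 if sel[i] else 0)
--         result.append(2 if i + 1 < n and sel[i + 1] else 0)
--     l[:] = result
--     return l
-- ===== Notes on version B (the rewrite author's own statement) =====
-- stated objective: faster
-- what changed: A finds kept 1-positions with a nested next-1 scan, grows the list with append loops and then makes three more index passes (doubling indexes, zero/one placement via 'i in ones_ndx' membership scans, stop placement); B computes the kept-flag list in one linear scan with a seen-flag and emits the doubled list in a single forward pass appending a (value, stop) slot pair per element.
import Mathlib
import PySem

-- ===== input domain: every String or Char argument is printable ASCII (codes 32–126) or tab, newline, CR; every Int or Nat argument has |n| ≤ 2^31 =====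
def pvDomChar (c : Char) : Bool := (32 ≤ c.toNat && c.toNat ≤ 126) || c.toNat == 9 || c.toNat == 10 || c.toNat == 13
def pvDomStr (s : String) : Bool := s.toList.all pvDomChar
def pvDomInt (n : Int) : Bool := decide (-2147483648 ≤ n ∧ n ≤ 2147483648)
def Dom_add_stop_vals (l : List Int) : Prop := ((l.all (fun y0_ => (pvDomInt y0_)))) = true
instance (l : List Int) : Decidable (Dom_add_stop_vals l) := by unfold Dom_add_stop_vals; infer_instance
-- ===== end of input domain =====

-- B replaces A's nested next-1 scan and four separate index passes by one seen-flag scan plus a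
-- single forward pass emitting (value, stop) slot pairs; A mutates l in place, the equivalence
-- proved here is about the return value (B's Python performs the same mutation via l[:] = result).

-- ===== PORT A =====
-- inner loop condition: l[i] == 1 and j > i and l[j] == 1
def pvCondA (l : List Int) (i j : Int) : Bool :=
  (PySem.List.pyGetD l i 0 == 1) && decide (i < j) && (PySem.List.pyGetD l j 0 == 1)

-- 'for j in range(i, len(l)): if cond: append j; break' = first j in the range with cond
def pvFindNext (l : List Int) (i : Int) : Option Int :=
  (PySem.List.pyRange i (l.length : Int) 1).find? (fun j => pvCondA l i j)

-- ones_ndx after the initial check and the nested loops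
def pvOnesA (l : List Int) : List Int :=
  (PySem.List.pyRange 0 (l.length : Int) 1).foldl
    (fun acc i => acc ++ (pvFindNext l i).toList)
    (if (PySem.List.pyGet? l 0).getD 0 == 1 then [0] else [])
    -- the initial pyGet? is none exactly on the empty list, where Python raises IndexError (outside Pre_)

def add_stop_vals (l : List Int) : List Int :=
  let n : Int := l.length
  let ones2 : List Int := (pvOnesA l).map (fun i => i * 2)
  let l2 : List Int := (PySem.List.pyRange 0 n 1).foldl (fun acc _ => acc ++ [0]) l
  let l3 : List Int := (PySem.List.pyRange 0 (l2.length : Int) 1).foldl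
    (fun acc i =>
      let acc' := PySem.List.pySetD acc i 0
      if ones2.contains i then PySem.List.pySetD acc' i 1 else acc') l2
  ones2.foldl (fun acc i => if 0 < i then PySem.List.pySetD acc (i - 1) 2 else acc) l3

-- ===== PORT B =====
def add_stop_vals_alt (l : List Int) : List Int :=
  let sel : List Bool := ((PySem.List.enumerate l).foldl
    (fun (st : List Bool × Bool) p =>
      (st.1 ++ [p.2 == 1 && (p.1 == 0 || st.2)], st.2 || (p.2 == 1))) ([], false)).1
  let n : Int := l.length
  (PySem.List.pyRange 0 n 1).foldl
    (fun acc i =>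
      acc ++ [if PySem.List.pyGetD sel i false then 1 else 0]
          ++ [if decide (i + 1 < n) && PySem.List.pyGetD sel (i + 1) false then 2 else 0]) []

-- ===== PRECONDITION & SPEC =====
-- Pre_ excludes only the empty list, on which Python A raises IndexError reading the first element.
def Pre_add_stop_vals (l : List Int) : Prop := l ≠ []
instance (l : List Int) : Decidable (Pre_add_stop_vals l) := by unfold Pre_add_stop_vals; infer_instance
def pvWitness_add_stop_vals : List Int := [1, 0, 1]

def Spec_add_stop_vals (l : List Int) (out : List Int) : Prop := out = add_stop_vals_alt l
instance (l : List Int) (out : List Int) : Decidable (Spec_add_stop_vals l out) := by unfold Spec_add_stop_vals; infer_instance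

-- ===== CLAIM (what is proved, stated in full; the proofs are below) =====
def Claim_equal_add_stop_vals : Prop := ∀ (l : List Int), Dom_add_stop_vals l → Pre_add_stop_vals l → Spec_add_stop_vals l (add_stop_vals l)

-- ===== LEMMAS AND PROOFS =====

-- selection predicate: position q of l keeps its 1 (l[q] == 1 and (q == 0 or some earlier 1))
def pvSelP (l : List Int) (q : Nat) : Bool :=
  (l.getD q 0 == 1) && (q == 0 || (l.take q).any (fun x => x == 1))

-- canonical doubled list both ports are proved equal to
def pvCanon (l : List Int) : List Int :=
  (List.range l.length).flatMap (fun q =>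
    [if pvSelP l q then 1 else 0,
     if decide (q + 1 < l.length) && pvSelP l (q + 1) then 2 else 0])

lemma pvGet0 (x : Int) (t : List Int) : (PySem.List.pyGet? (x::t) 0).getD 0 = x := by
  simp [PySem.List.pyGet?, PySem.List.pyIdx?]

lemma pvGetDnn (l : List Int) (i : Int) (h : 0 ≤ i) (d : Int) : PySem.List.pyGetD l i d = l.getD i.toNat d := by
  have e : i = ((i.toNat : Nat) : Int) := by omega
  conv_lhs => rw [e]
  rw [PySem.List.pyGetD_natCast]

lemma pvAnyTake (l : List Int) (q : Nat) :
    (l.take q).any (fun x => x == 1) = true ↔ ∃ k, k < q ∧ k < l.length ∧ l.getD k 0 = 1 := by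
  rw [List.any_eq_true]
  constructor
  · rintro ⟨x, hx, hx1⟩
    rw [List.mem_take_iff_getElem] at hx
    obtain ⟨j, hj, rfl⟩ := hx
    exact ⟨j, by omega, by omega, by simpa [List.getD_eq_getElem?_getD, List.getElem?_eq_getElem (by omega : j < l.length)] using hx1⟩
  · rintro ⟨k, hkq, hkl, hk1⟩
    refine ⟨l[k], ?_, ?_⟩
    · rw [List.mem_take_iff_getElem]; exact ⟨k, by omega, rfl⟩
    · simp [List.getD_eq_getElem?_getD, List.getElem?_eq_getElem hkl] at hk1 ⊢; omega

lemma pySetD_getElem? (xs : List Int) (i v : Int) (hi : 0 ≤ i) (m : Nat) :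
    (PySem.List.pySetD xs i v)[m]? = if i = (m : Int) ∧ m < xs.length then some v else xs[m]? := by
  rw [PySem.List.pySetD_of_nonneg xs v hi, List.getElem?_set]
  by_cases hm : m < xs.length <;> by_cases he : i.toNat = m
  · rw [if_pos he, if_pos (by omega : i.toNat < xs.length), if_pos ⟨by omega, hm⟩]
  · rw [if_neg he, if_neg (fun h => he (by omega))]
  · rw [if_pos he, if_neg (by omega : ¬ i.toNat < xs.length), if_neg (fun h => hm h.2)]
    exact (List.getElem?_eq_none (by omega)).symm
  · rw [if_neg he, if_neg (fun h => hm h.2)]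

lemma pvFlat2 (l : List Int) : l.flatMap (fun _ => ([0] : List Int)) = List.replicate l.length 0 := by
  induction l with
  | nil => rfl
  | cons x t ih => simp [List.flatMap_cons, ih, List.replicate_succ]

lemma pvLen2 (l : List Int) :
    ((PySem.List.pyRange 0 (l.length : Int) 1).foldl (fun acc _ => acc ++ [0]) l)
      = l ++ List.replicate l.length 0 := by
  rw [PySem.List.foldl_append_eq_flatMap (fun _ => ([0] : List Int)), pvFlat2]
  simp [PySem.List.length_pyRange_one]

lemma pvFlatLen (u v : Nat → Int) (n : Nat) :
    ((List.range n).flatMap (fun q => [u q, v q])).length = 2 * n := by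
  induction n with
  | zero => rfl
  | succ k ih => simp [List.range_succ, ih]; ring

lemma pvCanon_getElem? (u v : Nat → Int) (n m : Nat) :
    ((List.range n).flatMap (fun q => [u q, v q]))[m]?
      = if m < 2 * n then some (if m % 2 = 0 then u (m / 2) else v (m / 2)) else none := by
  induction n with
  | zero => simp
  | succ k ih =>
    rw [List.range_succ, List.flatMap_append]
    by_cases hm : m < 2 * k
    · rw [List.getElem?_append_left (by rw [pvFlatLen]; omega), ih, if_pos hm, if_pos (show m < 2 * (k+1) from by omega)]
    · rw [List.getElem?_append_right (by rw [pvFlatLen]; omega), pvFlatLen]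
      by_cases h1 : m = 2 * k
      · subst h1
        rw [if_pos (by omega : 2*k < 2*(k+1)), Nat.sub_self]
        have e1 : 2 * k % 2 = 0 := by omega
        have e2 : 2 * k / 2 = k := by omega
        rw [e1, e2]; rfl
      · by_cases h2 : m = 2 * k + 1
        · subst h2
          rw [if_pos (by omega : 2*k+1 < 2*(k+1)), (by omega : 2*k+1-2*k = 1)]
          have e1 : ¬ (2 * k + 1) % 2 = 0 := by omega
          have e2 : (2 * k + 1) / 2 = k := by omega
          rw [if_neg e1, e2]; rfl
        · rw [if_neg (by omega : ¬ m < 2 * (k+1))]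
          exact List.getElem?_eq_none (by simp; omega)

lemma pvSetPass (g : Int → Int) (b : Int) :
    ∀ (k : Nat) (a : Int) (acc : List Int), (b - a).toNat = k → ((acc.length : Int)) = b → 0 ≤ a →
    ∀ m : Nat,
    ((PySem.List.pyRange a b 1).foldl (fun acc i => PySem.List.pySetD acc i (g i)) acc)[m]?
      = if a ≤ (m : Int) ∧ (m : Int) < b then some (g m) else acc[m]? := by
  intro k
  induction k with
  | zero =>
    intro a acc hk hb ha m
    rw [PySem.List.pyRange_one_eq_nil (by omega)]
    rw [if_neg (by omega)]
    rfl
  | succ k ih =>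
    intro a acc hk hb ha m
    rw [PySem.List.pyRange_one_cons (by omega)]
    simp only [List.foldl_cons]
    rw [ih (a+1) _ (by omega) (by rw [PySem.List.length_pySetD]; omega) (by omega) m,
        pySetD_getElem? acc a (g a) ha m]
    by_cases h1 : a + 1 ≤ (m:Int) ∧ (m:Int) < b
    · rw [if_pos h1, if_pos (by omega)]
    · rw [if_neg h1]
      by_cases h2 : a = (m:Int) ∧ m < acc.length
      · rw [if_pos h2, if_pos (by omega), h2.1]
      · rw [if_neg h2, if_neg (by omega)]

lemma pvStopPass : ∀ (os : List Int) (acc : List Int) (m : Nat), (∀ i ∈ os, 0 ≤ i) →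
    (os.foldl (fun acc i => if 0 < i then PySem.List.pySetD acc (i - 1) 2 else acc) acc)[m]?
      = if (∃ i ∈ os, 0 < i ∧ i - 1 = (m : Int)) ∧ m < acc.length then some 2 else acc[m]? := by
  intro os
  induction os with
  | nil => intro acc m _; rw [if_neg (by simp)]; rfl
  | cons i t ih =>
    intro acc m hnn
    simp only [List.foldl_cons]
    by_cases hpos : 0 < i
    · rw [if_pos hpos, ih _ m (fun j hj => hnn j (List.mem_cons_of_mem _ hj)),
          PySem.List.length_pySetD, pySetD_getElem? acc (i-1) 2 (by omega) m]
      by_cases h1 : (∃ j ∈ t, 0 < j ∧ j - 1 = (m : Int)) ∧ m < acc.length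
      · rw [if_pos h1, if_pos ⟨⟨h1.1.choose, List.mem_cons_of_mem _ h1.1.choose_spec.1, h1.1.choose_spec.2⟩, h1.2⟩]
      · rw [if_neg h1]
        by_cases h2 : i - 1 = (m:Int) ∧ m < acc.length
        · rw [if_pos h2, if_pos ⟨⟨i, List.mem_cons_self, hpos, h2.1⟩, h2.2⟩]
        · rw [if_neg h2]
          by_cases h3 : (∃ j ∈ i :: t, 0 < j ∧ j - 1 = (m : Int)) ∧ m < acc.length
          · exfalso
            obtain ⟨⟨j, hj, hj0, hj1⟩, hm⟩ := h3
            rcases List.mem_cons.mp hj with rfl | hjt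
            · exact h2 ⟨hj1, hm⟩
            · exact h1 ⟨⟨j, hjt, hj0, hj1⟩, hm⟩
          · rw [if_neg h3]
    · rw [if_neg hpos, ih _ m (fun j hj => hnn j (List.mem_cons_of_mem _ hj))]
      by_cases h1 : (∃ j ∈ t, 0 < j ∧ j - 1 = (m : Int)) ∧ m < acc.length
      · rw [if_pos h1, if_pos ⟨⟨h1.1.choose, List.mem_cons_of_mem _ h1.1.choose_spec.1, h1.1.choose_spec.2⟩, h1.2⟩]
      · rw [if_neg h1]
        by_cases h3 : (∃ j ∈ i :: t, 0 < j ∧ j - 1 = (m : Int)) ∧ m < acc.length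
        · exfalso
          obtain ⟨⟨j, hj, hj0, hj1⟩, hm⟩ := h3
          rcases List.mem_cons.mp hj with rfl | hjt
          · exact hpos hj0
          · exact h1 ⟨⟨j, hjt, hj0, hj1⟩, hm⟩
        · rw [if_neg h3]

lemma pvOnesA_eq (l : List Int) : pvOnesA l
    = (if l.getD 0 0 = 1 then [(0:Int)] else [])
      ++ (PySem.List.pyRange 0 (l.length : Int) 1).flatMap (fun i => (pvFindNext l i).toList) := by
  unfold pvOnesA
  rw [PySem.List.foldl_append_eq_flatMap]
  congr 1
  cases l with
  | nil => simp [PySem.List.pyGet?]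
  | cons x t =>
    rw [pvGet0]
    by_cases h : x = 1
    · rw [if_pos (by simp [h]), if_pos (by simp [h])]
    · rw [if_neg (by simp [h]), if_neg (by simp [h])]

lemma mem_pvOnesA (l : List Int) (x : Int) :
    x ∈ pvOnesA l ↔ ∃ q : Nat, q < l.length ∧ x = (q : Int) ∧ pvSelP l q = true := by
  rw [pvOnesA_eq, List.mem_append, List.mem_flatMap]
  constructor
  · rintro (h0 | ⟨i, hi, hfind⟩)
    · have h1 : l.getD 0 0 = 1 ∧ x = 0 := by
        by_cases h : l.getD 0 0 = 1
        · rw [if_pos h] at h0; simp at h0; exact ⟨h, h0⟩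
        · rw [if_neg h] at h0; simp at h0
      have hl : 0 < l.length := by
        cases l with
        | nil => exfalso; simpa using h1.1
        | cons y t => simp
      refine ⟨0, hl, h1.2, ?_⟩
      unfold pvSelP
      rw [h1.1]
      simp
    · rw [Option.mem_toList] at hfind
      have hcond := List.find?_some hfind
      have hmem := List.mem_of_find?_eq_some hfind
      rw [PySem.List.mem_pyRange_one] at hmem hi
      simp only [pvCondA, Bool.and_eq_true, decide_eq_true_eq, beq_iff_eq] at hcond
      obtain ⟨⟨hgi, hix⟩, hgx⟩ := hcond
      refine ⟨x.toNat, by omega, by omega, ?_⟩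
      rw [pvGetDnn l x (by omega)] at hgx
      rw [pvGetDnn l i (by omega)] at hgi
      unfold pvSelP
      rw [(pvAnyTake l x.toNat).mpr ⟨i.toNat, by omega, by omega, hgi⟩, hgx]
      simp
  · rintro ⟨q, hq, rfl, hsel⟩
    unfold pvSelP at hsel
    simp only [Bool.and_eq_true, Bool.or_eq_true, beq_iff_eq] at hsel
    obtain ⟨hgq, hrest⟩ := hsel
    rcases hrest with h0 | hany
    · left
      have : q = 0 := by simpa using h0
      subst this
      rw [if_pos hgq]; simp
    · right
      obtain ⟨k, hkq, hkl, hk1⟩ := (pvAnyTake l q).mp hany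
      -- maximal earlier 1-index
      have hne : ((Finset.range q).filter (fun k => l.getD k 0 = 1)).Nonempty :=
        ⟨k, Finset.mem_filter.mpr ⟨Finset.mem_range.mpr hkq, hk1⟩⟩
      set T := (Finset.range q).filter (fun k => l.getD k 0 = 1) with hT
      set i0 := T.max' hne with hi0
      have hi0T : i0 ∈ T := T.max'_mem hne
      have hi0q : i0 < q := by
        have := Finset.mem_filter.mp hi0T; simpa using this.1
      have hi0g : l.getD i0 0 = 1 := (Finset.mem_filter.mp hi0T).2
      have hmax : ∀ j, i0 < j → j < q → l.getD j 0 ≠ 1 := by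
        intro j hij hjq hg
        have : j ∈ T := Finset.mem_filter.mpr ⟨Finset.mem_range.mpr hjq, hg⟩
        exact absurd (T.le_max' j this) (by omega)
      refine ⟨(i0 : Int), ?_, ?_⟩
      · rw [PySem.List.mem_pyRange_one]; constructor <;> [omega; exact_mod_cast by omega]
      · rw [Option.mem_toList]
        unfold pvFindNext
        rw [PySem.List.pyRange_one_append (i0:Int) (q:Int) (l.length:Int) (by exact_mod_cast by omega) (by exact_mod_cast by omega),
            List.find?_append]
        have hnone : (PySem.List.pyRange (i0:Int) (q:Int) 1).find? (fun j => pvCondA l (i0:Int) j) = none := by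
          rw [List.find?_eq_none]
          intro j hj hc
          rw [PySem.List.mem_pyRange_one] at hj
          simp only [pvCondA, Bool.and_eq_true, decide_eq_true_eq, beq_iff_eq] at hc
          obtain ⟨⟨_, hij⟩, hgj⟩ := hc
          rw [pvGetDnn l j (by omega)] at hgj
          exact hmax j.toNat (by omega) (by omega) hgj
        rw [hnone, Option.none_or]
        rw [PySem.List.pyRange_one_cons (by exact_mod_cast hq)]
        apply List.find?_cons_of_pos
        simp only [pvCondA, Bool.and_eq_true, decide_eq_true_eq, beq_iff_eq]
        refine ⟨⟨?_, by exact_mod_cast hi0q⟩, ?_⟩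
        · rw [pvGetDnn l (i0:Int) (by omega)]; simpa using hi0g
        · rw [pvGetDnn l (q:Int) (by omega)]; simpa using hgq

lemma pvSelLoop (xs : List Int) : ∀ (s : Int) (acc : List Bool) (b : Bool),
    ((PySem.List.enumerate xs s).foldl
      (fun (st : List Bool × Bool) p =>
        (st.1 ++ [p.2 == 1 && (p.1 == 0 || st.2)], st.2 || (p.2 == 1))) (acc, b))
    = (acc ++ (List.range xs.length).map
        (fun k => xs.getD k 0 == 1 && ((s + (k : Int) == 0) || (b || (xs.take k).any (fun x => x == 1)))),
       b || xs.any (fun x => x == 1)) := by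
  induction xs with
  | nil => intro s acc b; simp [PySem.List.enumerate_nil]
  | cons x t ih =>
    intro s acc b
    rw [PySem.List.enumerate_cons, List.foldl_cons, ih (s+1)]
    refine Prod.ext ?_ ?_
    · show (acc ++ [x == 1 && (s == 0 || b)]) ++ _ = acc ++ _
      rw [List.append_assoc]
      congr 1
      show _ = (List.range (t.length + 1)).map _
      rw [List.range_succ_eq_map, List.map_cons, List.map_map]
      refine congrArg₂ List.cons ?_ ?_
      · simp
      · refine List.map_congr_left fun a ha => ?_
        simp only [Function.comp_apply, List.getD_cons_succ, List.take_succ_cons, List.any_cons]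
        have e1 : ((s + 1 + (a:Int)) == 0) = ((s + ((a:Int) + 1)) == 0) := by
          have e : s + 1 + (a:Int) = s + ((a:Int)+1) := by ring
          rw [e]
        rw [e1]
        push_cast
        cases (s + ((a:Int)+1)) == 0 <;> cases ht : (t.getD a 0 == 1) <;> cases b <;>
          cases x == 1 <;> cases ((t.take a).any fun y => y == 1) <;> rfl
    · simp [List.any_cons, Bool.or_assoc]

lemma pySetD_pySetD_same (xs : List Int) (i v w : Int) :
    PySem.List.pySetD (PySem.List.pySetD xs i v) i w = PySem.List.pySetD xs i w := by
  unfold PySem.List.pySetD PySem.List.pySet?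
  cases h : PySem.List.pyIdx? xs.length i with
  | none => simp [h]
  | some k =>
    simp only [h, Option.map_some, Option.getD_some, List.length_set, List.set_set]

lemma pvStep3 (c : List Int) :
    (fun (acc : List Int) i =>
      let acc' := PySem.List.pySetD acc i 0
      if c.contains i then PySem.List.pySetD acc' i 1 else acc')
    = fun (acc : List Int) i => PySem.List.pySetD acc i (if c.contains i then 1 else 0) := by
  funext acc i
  by_cases h : i ∈ c <;> simp [h, pySetD_pySetD_same]

lemma pvSetFoldLen (g : Int → Int) : ∀ (r : List Int) (acc : List Int),
    (r.foldl (fun acc i => PySem.List.pySetD acc i (g i)) acc).length = acc.length := by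
  intro r
  induction r with
  | nil => intro acc; rfl
  | cons i t ih => intro acc; rw [List.foldl_cons, ih, PySem.List.length_pySetD]

lemma pvA_eq_canon (l : List Int) : add_stop_vals l = pvCanon l := by
  have hmem2 : ∀ y : Int, y ∈ (pvOnesA l).map (fun i => i * 2) ↔
      ∃ q : Nat, q < l.length ∧ pvSelP l q = true ∧ y = 2 * (q : Int) := by
    intro y
    rw [List.mem_map]
    constructor
    · rintro ⟨x, hx, rfl⟩
      obtain ⟨q, hq, rfl, hs⟩ := (mem_pvOnesA l x).mp hx
      exact ⟨q, hq, hs, by ring⟩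
    · rintro ⟨q, hq, hs, rfl⟩
      exact ⟨(q : Int), (mem_pvOnesA l _).mpr ⟨q, hq, rfl, hs⟩, by ring⟩
  have hnn : ∀ i ∈ (pvOnesA l).map (fun i => i * 2), 0 ≤ i := by
    intro i hi
    obtain ⟨q, _, _, rfl⟩ := (hmem2 i).mp hi
    omega
  apply List.ext_getElem?
  intro m
  unfold add_stop_vals
  dsimp only
  rw [pvStep3, pvLen2]
  have hL2 : (l ++ List.replicate l.length 0).length = 2 * l.length := by
    simp
    omega
  rw [pvStopPass _ _ m hnn, pvSetFoldLen]
  have key := pvSetPass (fun i => if ((pvOnesA l).map (fun i => i * 2)).contains i then 1 else 0)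
        (((l ++ List.replicate l.length 0).length : Int))
        ((((l ++ List.replicate l.length 0).length : Int)) - 0).toNat 0
        (l ++ List.replicate l.length 0) rfl rfl (le_refl 0) m
  rw [key]
  unfold pvCanon
  rw [pvCanon_getElem?]
  set os := (pvOnesA l).map (fun i => i * 2) with hos
  by_cases hm : m < 2 * l.length
  · rw [if_pos hm]
    by_cases hpar : m % 2 = 0
    · -- even slot: a kept 1 or 0, never a stop value
      have hnot : ¬ ((∃ i ∈ os, 0 < i ∧ i - 1 = (m : Int)) ∧ m < (l ++ List.replicate l.length 0).length) := by
        rintro ⟨⟨i, hi, h0, hi1⟩, _⟩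
        obtain ⟨q, _, _, rfl⟩ := (hmem2 i).mp hi
        omega
      rw [if_neg hnot, if_pos ⟨by omega, by rw [hL2]; exact_mod_cast hm⟩, if_pos hpar]
      have hc : (os.contains (m : Int)) = pvSelP l (m / 2) := by
        by_cases hs : pvSelP l (m / 2) = true
        · rw [hs]
          rw [List.contains_iff_mem]
          exact (hmem2 _).mpr ⟨m / 2, by omega, hs, by omega⟩
        · rw [Bool.eq_false_iff.mpr hs]
          rw [Bool.eq_false_iff]
          intro hcontains
          obtain ⟨q, hq, hsq, he⟩ := (hmem2 _).mp (List.contains_iff_mem.mp hcontains)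
          have : q = m / 2 := by omega
          exact hs (this ▸ hsq)
      rw [hc]
    · -- odd slot: a stop value or 0
      rw [if_neg hpar]
      by_cases hstop : (∃ i ∈ os, 0 < i ∧ i - 1 = (m : Int)) ∧ m < (l ++ List.replicate l.length 0).length
      · rw [if_pos hstop]
        obtain ⟨⟨i, hi, h0, hi1⟩, _⟩ := hstop
        obtain ⟨q, hq, hsq, rfl⟩ := (hmem2 i).mp hi
        have hq2 : q = m / 2 + 1 := by omega
        have hd : (decide (m / 2 + 1 < l.length)) = true := by
          simp only [decide_eq_true_eq]; omega
        rw [hd, ← hq2, hsq]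
        rfl
      · rw [if_neg hstop]
        rw [if_pos ⟨by omega, by rw [hL2]; exact_mod_cast hm⟩]
        have hc : (os.contains (m : Int)) = false := by
          rw [Bool.eq_false_iff]
          intro hcontains
          obtain ⟨q, hq, hsq, he⟩ := (hmem2 _).mp (List.contains_iff_mem.mp hcontains)
          omega
        rw [hc]
        have hg : (decide (m / 2 + 1 < l.length) && pvSelP l (m / 2 + 1)) = false := by
          rw [Bool.eq_false_iff]
          intro hb
          rw [Bool.and_eq_true, decide_eq_true_eq] at hb
          exact hstop ⟨⟨2 * ((m / 2 : Nat) + 1 : Nat), (hmem2 _).mpr ⟨m / 2 + 1, hb.1, hb.2, by push_cast; ring⟩,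
            by omega, by omega⟩, by rw [hL2]; omega⟩
        rw [hg]
        rfl
  · rw [if_neg hm,
        if_neg (by rw [hL2]; exact fun h => hm h.2),
        if_neg (by rw [hL2]; intro h; exact hm (by exact_mod_cast h.2))]
    exact List.getElem?_eq_none (by omega)

lemma pvSel_eq (l : List Int) :
    ((PySem.List.enumerate l).foldl
      (fun (st : List Bool × Bool) p =>
        (st.1 ++ [p.2 == 1 && (p.1 == 0 || st.2)], st.2 || (p.2 == 1))) ([], false)).1
    = (List.range l.length).map (pvSelP l) := by
  rw [pvSelLoop l 0 [] false]
  simp only [List.nil_append]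
  apply List.map_congr_left
  intro k hk
  unfold pvSelP
  have e : (((0:Int) + (k:Int)) == 0) = (k == 0) := by
    by_cases h : k = 0
    · subst h; rfl
    · simp [h]
  rw [e]
  simp

lemma pvB_eq_canon (l : List Int) : add_stop_vals_alt l = pvCanon l := by
  unfold add_stop_vals_alt pvCanon
  dsimp only
  rw [pvSel_eq]
  have hstep : (fun (acc : List Int) (i : Int) =>
      acc ++ [if PySem.List.pyGetD ((List.range l.length).map (pvSelP l)) i false then 1 else 0]
          ++ [if decide (i + 1 < (l.length : Int)) && PySem.List.pyGetD ((List.range l.length).map (pvSelP l)) (i + 1) false then 2 else 0])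
      = fun (acc : List Int) (i : Int) =>
      acc ++ ([if PySem.List.pyGetD ((List.range l.length).map (pvSelP l)) i false then 1 else 0]
          ++ [if decide (i + 1 < (l.length : Int)) && PySem.List.pyGetD ((List.range l.length).map (pvSelP l)) (i + 1) false then 2 else 0]) := by
    funext acc i; rw [List.append_assoc]
  rw [hstep, PySem.List.foldl_append_eq_flatMap, List.nil_append, PySem.List.pyRange_zero]
  rw [Int.toNat_natCast, List.flatMap_map]
  rw [List.flatMap]
  rw [List.flatMap]
  congr 1
  apply List.map_congr_left
  intro q hq
  rw [List.mem_range] at hq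
  rw [List.singleton_append]
  have e1 : PySem.List.pyGetD ((List.range l.length).map (pvSelP l)) (q:Int) false = pvSelP l q := by
    rw [PySem.List.pyGetD_natCast, PySem.List.getD_map_range _ _ _ _ hq]
  have e2 : (decide ((q:Int) + 1 < (l.length:Int)) && PySem.List.pyGetD ((List.range l.length).map (pvSelP l)) ((q:Int) + 1) false)
      = (decide (q + 1 < l.length) && pvSelP l (q + 1)) := by
    have ec : ((q:Int) + 1) = ((q+1 : Nat) : Int) := by push_cast; ring
    rw [ec, PySem.List.pyGetD_natCast]
    by_cases h : q + 1 < l.length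
    · rw [PySem.List.getD_map_range _ _ _ _ h]
      have d1 : (decide (((q+1:Nat):Int) < (l.length:Int))) = true := by
        simp only [decide_eq_true_eq]; exact_mod_cast h
      have d2 : (decide (q + 1 < l.length)) = true := by simp only [decide_eq_true_eq]; exact h
      rw [d1, d2]
    · have d1 : (decide (((q+1:Nat):Int) < (l.length:Int))) = false := by
        simp only [decide_eq_false_iff_not]; push_cast; omega
      have d2 : (decide (q + 1 < l.length)) = false := by
        simp only [decide_eq_false_iff_not]; omega
      rw [d1, d2]
      simp
  rw [e1, e2]

-- ===== VERDICT (by name: the statement is the Claim_ definition above) =====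
theorem add_stop_vals_spec : Claim_equal_add_stop_vals := by
  intro l _ _
  unfold Spec_add_stop_vals
  rw [pvA_eq_canon, pvB_eq_canon]
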